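-- pv_equiv track=rewrite | github.com/stineje/CharLib | charlib/characterizer/logic/Parser.py | _resolve_unates
-- ===== SOURCE A (Python) =====
-- def _resolve_unates(syntax_tree: list, target: str):
--     """Determine the 'unateness' of the function with respect to the target input."""
--     op = syntax_tree.pop(0)
--     if op == '~':
--         unate_l = -1
--         unate_r = None
--     elif op == '&' or op == '*':
--         unate_l = 1
--         unate_r = 1
--     elif str(op) in ['|', '+', '^', '~^']:
--         # can't determine these yet - have to check which side contains the target
--         unate_l = 0
--         unate_r = 0
--     else:
--         return syntax_tree, {op: 1} # Return symbol
--     # Resolve left side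
--     syntax_tree, unates = _resolve_unates(syntax_tree, target)
--     # Check for target in left side
--     if unate_l == 0 and target in unates:
--         unate_l = 1
--     else:
--         unate_l = -1
--     for k,u in unates.items():
--         unates[k] = unate_l * u
--     # Resolve right side
--     if unate_r is not None:
--         syntax_tree, unates_r = _resolve_unates(syntax_tree, target)
--         # Check for target in right side
--         if unate_r == 0 and target in unates_r:
--             unate_r = 1
--         else:
--             unate_r = -1
--         for k,u in unates_r.items():
--             unates[k] = unate_r * u
--     return syntax_tree, unates
-- ===== SOURCE B (Python) =====
-- # B: parse the prefix token list into an expression tree (consuming via pop(0)),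
-- # then compute the unate dict by a separate post-order walk over the tree.
-- _OR_OPS = ('|', '+', '^', '~^')
--
--
-- def _parse(tokens):
--     tok = tokens.pop(0)
--     if tok == '~':
--         return ('~', _parse(tokens))
--     if tok in ('&', '*') or tok in _OR_OPS:
--         left = _parse(tokens)
--         right = _parse(tokens)
--         return (tok, left, right)
--     return tok
--
--
-- def _unates(node, target):
--     if not isinstance(node, tuple):
--         return {node: 1}
--     if node[0] == '~':
--         return {k: -v for k, v in _unates(node[1], target).items()}
--     op, left, right = node
--     ld = _unates(left, target)
--     rd = _unates(right, target)
--     ls = 1 if op in _OR_OPS and target in ld else -1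
--     rs = 1 if op in _OR_OPS and target in rd else -1
--     out = {k: ls * v for k, v in ld.items()}
--     for k, v in rd.items():
--         out[k] = rs * v
--     return out
--
--
-- def _resolve_unates(syntax_tree: list, target: str):
--     node = _parse(syntax_tree)
--     return syntax_tree, _unates(node, target)
-- ===== Notes on version B (the rewrite author's own statement) =====
-- stated objective: alternative
-- what changed: A interleaves parsing the flat prefix token list with computing the unate signs in one recursion; B splits the task into a small recursive parser that builds an explicit expression tree (still consuming the shared list via pop(0)) and a separate post-order walk over that tree that computes the sign dict, with each side's multiplier given by one rule (1 iff the op is in the OR family and the target occurs on that side, else -1).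
import Mathlib
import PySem

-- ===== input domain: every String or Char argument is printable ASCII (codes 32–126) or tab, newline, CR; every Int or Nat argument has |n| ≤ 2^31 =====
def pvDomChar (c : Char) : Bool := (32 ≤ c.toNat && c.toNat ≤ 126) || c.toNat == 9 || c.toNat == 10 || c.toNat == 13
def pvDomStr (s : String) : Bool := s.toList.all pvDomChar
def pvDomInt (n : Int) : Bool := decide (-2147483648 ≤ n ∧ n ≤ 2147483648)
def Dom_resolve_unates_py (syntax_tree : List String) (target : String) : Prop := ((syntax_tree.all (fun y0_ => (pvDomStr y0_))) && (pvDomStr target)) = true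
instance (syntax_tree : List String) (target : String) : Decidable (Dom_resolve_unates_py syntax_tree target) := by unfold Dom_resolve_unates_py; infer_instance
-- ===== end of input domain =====

-- B splits A's single recursion into a parse-to-tree phase and a separate post-order
-- sign walk (objective: alternative decomposition, same cost). Both Pythons mutate
-- syntax_tree via pop(0) identically; the ports model the list functionally, returning
-- the consumed remainder as the first component.

-- ===== PORT A =====
-- A raises IndexError (pop from empty list) on malformed prefix input; the port models
-- that as Option.none internally (fuel := length+1 is a totality guard only: every
-- recursive call works on a strictly shorter list) and Pre_ excludes those inputs.
def resolveA (target : String) : Nat → List String → Option (List String × PySem.Dict String Int)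
  | 0, _ => none
  | _ + 1, [] => none   -- syntax_tree.pop(0) raises IndexError
  | fuel + 1, op :: rest =>
    -- the if/elif/elif chain setting (unate_l, unate_r); none = the final 'else: return symbol'
    match (if op = "~" then some ((-1 : Int), (none : Option Int))
           else if op = "&" ∨ op = "*" then some (1, some 1)
           else if op ∈ (["|", "+", "^", "~^"] : List String) then some (0, some 0)
           else none) with
    | none => some (rest, PySem.Dict.mk [(op, 1)])   -- return syntax_tree, {op: 1}
    | some (unate_l, unate_r) =>
      match resolveA target fuel rest with
      | none => none
      | some (st1, unates) =>
        let ul : Int := if unate_l = 0 ∧ unates.contains target then 1 else -1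
        let unates := unates.items.foldl (fun d kv => d.insert kv.1 (ul * kv.2)) unates
        match unate_r with
        | none => some (st1, unates)
        | some ur0 =>
          match resolveA target fuel st1 with
          | none => none
          | some (st2, unates_r) =>
            let ur : Int := if ur0 = 0 ∧ unates_r.contains target then 1 else -1
            let unates := unates_r.items.foldl (fun d kv => d.insert kv.1 (ur * kv.2)) unates
            some (st2, unates)

def resolve_unates_py (syntax_tree : List String) (target : String) : List String × (List (String × Int)) :=
  match resolveA target (syntax_tree.length + 1) syntax_tree with
  | some (rest, d) => (rest, d.items)
  | none => ([], [])   -- A raises here; excluded by Pre_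

-- ===== PORT B =====
inductive BNode where
  | leaf : String → BNode
  | neg : BNode → BNode
  | bin : String → BNode → BNode → BNode
deriving DecidableEq, Repr

-- recursive descent parser (_parse); fuel is a totality guard only
def parseB : Nat → List String → Option (BNode × List String)
  | 0, _ => none
  | _ + 1, [] => none   -- tokens.pop(0) raises IndexError
  | fuel + 1, tok :: rest =>
    if tok = "~" then
      match parseB fuel rest with
      | none => none
      | some (c, r) => some (.neg c, r)
    else if (tok = "&" ∨ tok = "*") ∨ tok ∈ (["|", "+", "^", "~^"] : List String) then
      match parseB fuel rest with
      | none => none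
      | some (l, r1) =>
        match parseB fuel r1 with
        | none => none
        | some (r, r2) => some (.bin tok l r, r2)
    else some (.leaf tok, rest)

-- post-order sign walk (_unates)
def unatesB (target : String) : BNode → PySem.Dict String Int
  | .leaf s => PySem.Dict.mk [(s, 1)]
  | .neg c => PySem.Dict.mk ((unatesB target c).items.map (fun kv => (kv.1, -kv.2)))
  | .bin op l r =>
    let ld := unatesB target l
    let rd := unatesB target r
    let ls : Int := if op ∈ (["|", "+", "^", "~^"] : List String) ∧ ld.contains target then 1 else -1
    let rs : Int := if op ∈ (["|", "+", "^", "~^"] : List String) ∧ rd.contains target then 1 else -1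
    let out := PySem.Dict.mk (ld.items.map (fun kv => (kv.1, ls * kv.2)))
    rd.items.foldl (fun d kv => d.insert kv.1 (rs * kv.2)) out

def resolve_unates_py_alt (syntax_tree : List String) (target : String) : List String × (List (String × Int)) :=
  match parseB (syntax_tree.length + 1) syntax_tree with
  | some (n, rest) => (rest, (unatesB target n).items)
  | none => ([], [])   -- B raises here too; excluded by Pre_

-- ===== PRECONDITION & SPEC =====
-- Pre_ excludes exactly the malformed prefix inputs on which A raises IndexError
-- (pop from an exhausted list); it is the standard counter criterion for a flat
-- prefix expression: scanning tokens with 1 pending expression, each binary op adds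
-- one pending expression, '~' keeps it, a symbol closes one; A returns iff the
-- pending count reaches 0.
def tokNeed (t : String) : Int :=
  if t = "~" then 0
  else if t = "&" ∨ t = "*" ∨ t ∈ (["|", "+", "^", "~^"] : List String) then 1
  else -1

def Pre_resolve_unates_py (syntax_tree : List String) (target : String) : Prop :=
  (0 : Int) ∈ syntax_tree.scanl (fun c t => c + tokNeed t) 1

instance (syntax_tree : List String) (target : String) : Decidable (Pre_resolve_unates_py syntax_tree target) := by
  unfold Pre_resolve_unates_py; infer_instance

def pvWitness_resolve_unates_py : List String × String := (["&", "a", "b"], "a")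

def Spec_resolve_unates_py (syntax_tree : List String) (target : String) (out : List String × (List (String × Int))) : Prop := out = resolve_unates_py_alt syntax_tree target
instance (syntax_tree : List String) (target : String) (out : List String × (List (String × Int))) : Decidable (Spec_resolve_unates_py syntax_tree target out) := by unfold Spec_resolve_unates_py; infer_instance

-- ===== CLAIM (what is proved, stated in full; the proofs are below) =====
def Claim_equal_resolve_unates_py : Prop := ∀ (syntax_tree : List String) (target : String), Dom_resolve_unates_py syntax_tree target → Pre_resolve_unates_py syntax_tree target → Spec_resolve_unates_py syntax_tree target (resolve_unates_py syntax_tree target)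

-- ===== LEMMAS AND PROOFS =====

-- A's in-place loop 'for k,u in unates.items(): unates[k] = m*u' over a dict with
-- distinct keys is the value-map B writes as a comprehension
theorem selfFold (m : Int) (suf : List (String × Int)) : ∀ (pre : List (String × Int)),
    ((pre ++ suf).map Prod.fst).Nodup →
    suf.foldl (fun d kv => d.insert kv.1 (m * kv.2))
      (PySem.Dict.mk (pre.map (fun kv => (kv.1, m * kv.2)) ++ suf))
    = PySem.Dict.mk ((pre ++ suf).map (fun kv => (kv.1, m * kv.2))) := by
  induction suf with
  | nil => intro pre h; simp
  | cons kv suf ih =>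
    intro pre h
    obtain ⟨k, v⟩ := kv
    have h' := h
    simp [List.nodup_append, List.nodup_cons] at h'
    have hkpre : ∀ q ∈ pre, q.1 ≠ k := by
      intro q hq hqk
      exact (h'.2.2 q.1 q.2 hq).1 hqk
    have hksuf : ∀ q ∈ suf, q.1 ≠ k := by
      intro q hq hqk
      have : (k, q.2) ∈ suf := by rw [← hqk, Prod.mk.eta]; exact hq
      exact h'.2.1.1 q.2 this
    have hcont : (PySem.Dict.mk (pre.map (fun kv => (kv.1, m * kv.2)) ++ (k, v) :: suf)).contains k = true := by
      simp [PySem.Dict.contains_mk]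
    rw [List.foldl_cons]
    have hins : (PySem.Dict.mk (pre.map (fun kv => (kv.1, m * kv.2)) ++ (k, v) :: suf)).insert k (m * v)
        = PySem.Dict.mk ((pre ++ [(k, v)]).map (fun kv => (kv.1, m * kv.2)) ++ suf) := by
      ext1
      rw [PySem.Dict.items_insert_of_contains _ _ hcont]
      simp [List.map_append]
      have h1 : List.map ((fun p => if p.1 = k then (k, m * v) else p) ∘ fun kv : String × Int => (kv.1, m * kv.2)) pre
          = List.map (fun kv : String × Int => (kv.1, m * kv.2)) pre := by
        apply List.map_congr_left
        intro q hq
        simp [hkpre q hq]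
      have h2 : List.map (fun p : String × Int => if p.1 = k then (k, m * v) else p) suf = suf := by
        have : List.map (fun p : String × Int => if p.1 = k then (k, m * v) else p) suf = List.map id suf := by
          apply List.map_congr_left
          intro q hq
          simp [hksuf q hq]
        simpa using this
      rw [h1, h2]
    rw [hins]
    have := ih (pre ++ [(k, v)]) (by simpa using h)
    simpa using this

theorem selfFold_dict (m : Int) (d : PySem.Dict String Int) (h : d.keys.Nodup) :
    d.items.foldl (fun d' kv => d'.insert kv.1 (m * kv.2)) d
    = PySem.Dict.mk (d.items.map (fun kv => (kv.1, m * kv.2))) := by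
  obtain ⟨l⟩ := d
  have h' : ((([] : List (String × Int)) ++ l).map Prod.fst).Nodup := by
    simpa [PySem.Dict.keys_mk] using h
  simpa using selfFold m l [] h'

-- the keys of a unatesB dict are always distinct
theorem unatesB_nodup_keys (target : String) (n : BNode) : (unatesB target n).keys.Nodup := by
  induction n with
  | leaf s => simp [unatesB, PySem.Dict.keys_mk]
  | neg c ih =>
    simpa [unatesB, PySem.Dict.keys_mk, List.map_map, Function.comp,
      PySem.Dict.keys] using ih
  | bin op l r ihl ihr =>
    simp only [unatesB]
    apply PySem.Dict.nodup_keys_foldl_insert_key _ Prod.fst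
    simpa [PySem.Dict.keys_mk, List.map_map, Function.comp, PySem.Dict.keys] using ihl

-- every resolveA step computes what parseB-then-unatesB computes
theorem main_equiv (target : String) : ∀ (fuel : Nat) (st : List String),
    resolveA target fuel st = (parseB fuel st).map (fun p => (p.2, unatesB target p.1)) := by
  intro fuel
  induction fuel with
  | zero => intro st; simp [resolveA, parseB]
  | succ fuel ih =>
    intro st
    cases st with
    | nil => simp [resolveA, parseB]
    | cons op rest =>
      by_cases h1 : op = "~"
      · subst h1
        simp only [resolveA, parseB, if_true, ih rest]
        cases hp : parseB fuel rest with
        | none => simp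
        | some p =>
          obtain ⟨c, r1⟩ := p
          simp only [Option.map_some]
          have hul : (if (-1 : Int) = 0 ∧ (unatesB target c).contains target then (1 : Int) else -1) = -1 := by
            simp
          rw [hul, selfFold_dict _ _ (unatesB_nodup_keys target c)]
          simp [unatesB]
      · by_cases h2 : op = "&" ∨ op = "*"
        · have hmem : ((op = "&" ∨ op = "*") ∨ op ∈ (["|", "+", "^", "~^"] : List String)) := Or.inl h2
          have hnotor : op ∉ (["|", "+", "^", "~^"] : List String) := by
            rcases h2 with rfl | rfl <;> decide
          simp only [resolveA, parseB, if_neg h1, if_pos h2, if_pos hmem, ih]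
          cases hp : parseB fuel rest with
          | none => simp
          | some p =>
            obtain ⟨l, r1⟩ := p
            simp only [Option.map_some]
            have hul : (if (1 : Int) = 0 ∧ (unatesB target l).contains target then (1 : Int) else -1) = -1 := by
              simp
            rw [hul, selfFold_dict _ _ (unatesB_nodup_keys target l)]
            cases hq : parseB fuel r1 with
            | none => simp
            | some q =>
              obtain ⟨r, r2⟩ := q
              simp only [Option.map_some]
              have hur : (if (1 : Int) = 0 ∧ (unatesB target r).contains target then (1 : Int) else -1) = -1 := by
                simp
              rw [hur]
              simp [unatesB, hnotor]
        · by_cases h3 : op ∈ (["|", "+", "^", "~^"] : List String)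
          · have hmem : ((op = "&" ∨ op = "*") ∨ op ∈ (["|", "+", "^", "~^"] : List String)) := Or.inr h3
            simp only [resolveA, parseB, if_neg h1, if_neg h2, if_pos h3, if_pos hmem, ih]
            cases hp : parseB fuel rest with
            | none => simp
            | some p =>
              obtain ⟨l, r1⟩ := p
              simp only [Option.map_some]
              simp only [true_and]
              rw [selfFold_dict _ _ (unatesB_nodup_keys target l)]
              cases hq : parseB fuel r1 with
              | none => simp
              | some q =>
                obtain ⟨r, r2⟩ := q
                simp only [Option.map_some]
                simp [unatesB, h3]
          · have h3' : ¬(op = "|" ∨ op = "+" ∨ op = "^" ∨ op = "~^") := by simpa using h3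
            simp [resolveA, parseB, h1, h2, h3', unatesB]

-- ===== VERDICT (by name: the statement is the Claim_ definition above) =====
theorem resolve_unates_py_spec : Claim_equal_resolve_unates_py := by
  intro st t _ _
  unfold Spec_resolve_unates_py resolve_unates_py resolve_unates_py_alt
  rw [main_equiv]
  rcases parseB (st.length + 1) st with _ | ⟨n, rest⟩ <;> simp
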